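-- pv_equiv track=rewrite | github.com/ariuk44/retake_exam_prep | day_28.py | largestDifferenceOfEvens
-- ===== SOURCE A (Python) =====
-- def largestDifferenceOfEvens(arr):
--     max_even = None
--     min_even = None
--     count_even = 0
--     for i in arr:
--         if i % 2 == 0:
--             count_even += 1
--             if max_even is None or i > max_even:
--                 max_even = i
--             if min_even is None or i < min_even:
--                 min_even = i
--     if count_even < 2:
--         return -1
--     return max_even - min_even
-- ===== SOURCE B (Python) =====
-- def largestDifferenceOfEvens(arr):
--     evens = sorted(x for x in arr if x % 2 == 0)
--     if len(evens) < 2: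
--         return -1
--     return evens[-1] - evens[0]
-- ===== Notes on version B (the rewrite author's own statement) =====
-- stated objective: alternative
-- what changed: Replaces the single fused max/min/count tracking pass with sorting the even elements and subtracting the endpoints of the sorted list (last minus first), with a length guard for the -1 sentinel.
import Mathlib
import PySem

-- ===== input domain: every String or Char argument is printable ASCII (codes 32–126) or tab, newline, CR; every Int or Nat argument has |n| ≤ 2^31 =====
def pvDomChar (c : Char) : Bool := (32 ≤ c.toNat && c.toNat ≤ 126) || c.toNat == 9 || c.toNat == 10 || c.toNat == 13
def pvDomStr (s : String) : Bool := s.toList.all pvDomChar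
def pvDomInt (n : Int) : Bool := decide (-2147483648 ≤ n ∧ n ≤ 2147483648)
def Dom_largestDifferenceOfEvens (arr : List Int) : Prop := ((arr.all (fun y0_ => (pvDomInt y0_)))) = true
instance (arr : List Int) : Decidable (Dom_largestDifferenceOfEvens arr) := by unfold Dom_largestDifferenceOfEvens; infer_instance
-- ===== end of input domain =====

-- ===== PORT A =====
-- B sorts the even elements and subtracts the endpoints of the sorted list;
-- A fuses max/min/count tracking into one pass.
def pvStepA (acc : Option Int × Option Int × Int) (i : Int) : Option Int × Option Int × Int :=
  if i % 2 == 0 then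
    ((match acc.1 with | none => some i | some m => if m < i then some i else some m),
     (match acc.2.1 with | none => some i | some n => if i < n then some i else some n),
     acc.2.2 + 1)
  else acc

def largestDifferenceOfEvens (arr : List Int) : Int :=
  let s := arr.foldl pvStepA (none, none, 0)
  if s.2.2 < 2 then -1
  else
    match s.1, s.2.1 with
    | some a, some b => a - b
    | _, _ => -1  -- unreachable: count_even ≥ 2 forces both max_even and min_even set

-- ===== PORT B =====
def largestDifferenceOfEvens_alt (arr : List Int) : Int :=
  let evens := PySem.List.sorted (arr.filter (fun x => x % 2 == 0)) (fun x => x) false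
  if evens.length < 2 then -1
  else (PySem.List.pyGet? evens (-1)).getD 0 - (PySem.List.pyGet? evens 0).getD 0
  -- getD 0 is unreachable as a default: evens.length ≥ 2 makes both pyGet? some

-- ===== PRECONDITION & SPEC =====
def Spec_largestDifferenceOfEvens (arr : List Int) (out : Int) : Prop := out = largestDifferenceOfEvens_alt arr
instance (arr : List Int) (out : Int) : Decidable (Spec_largestDifferenceOfEvens arr out) := by unfold Spec_largestDifferenceOfEvens; infer_instance

-- ===== CLAIM (what is proved, stated in full; the proofs are below) =====
def Claim_equal_largestDifferenceOfEvens : Prop := ∀ (arr : List Int), Dom_largestDifferenceOfEvens arr → Spec_largestDifferenceOfEvens arr (largestDifferenceOfEvens arr)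

-- ===== LEMMAS AND PROOFS =====

-- inner body of pvStepA, with the evenness test stripped (for foldl_if_eq_foldl_filter)
def pvStepA' (acc : Option Int × Option Int × Int) (i : Int) : Option Int × Option Int × Int :=
  ((match acc.1 with | none => some i | some m => if m < i then some i else some m),
   (match acc.2.1 with | none => some i | some n => if i < n then some i else some n),
   acc.2.2 + 1)

theorem pvStepA_eq_if (acc : Option Int × Option Int × Int) (i : Int) :
    pvStepA acc i = if i % 2 == 0 then pvStepA' acc i else acc := rfl

theorem foldStep_some (l : List Int) : ∀ (m n : Int) (c : Int),
    l.foldl pvStepA' (some m, some n, c) = (some (l.foldl max m), some (l.foldl min n), c + l.length) := by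
  induction l with
  | nil => intro m n c; simp
  | cons x t ih =>
    intro m n c
    simp only [List.foldl_cons, pvStepA']
    have hmax : (if m < x then some x else some m) = some (max m x) := by
      split_ifs with h <;> simp [max_def] <;> omega
    have hmin : (if x < n then some x else some n) = some (min n x) := by
      split_ifs with h <;> simp [min_def] <;> omega
    simp only [hmax, hmin, ih]
    simp [Prod.ext_iff]; omega

theorem foldl_max_eq (l : List Int) : ∀ (a M : Int), (M = a ∨ M ∈ l) → a ≤ M → (∀ y ∈ l, y ≤ M) →
    l.foldl max a = M := by
  induction l with
  | nil => intro a M h1 h2 _; simp; rcases h1 with h | h; omega; simp at h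
  | cons x t ih =>
    intro a M h1 h2 h3
    simp only [List.foldl_cons]
    have hx := h3 x (by simp)
    apply ih
    · rcases h1 with h | h
      · left; rcases max_choice a x with hmx | hmx <;> omega
      · rcases List.mem_cons.mp h with h | h
        · left; rcases max_choice a x with hmx | hmx <;> omega
        · right; exact h
    · rcases max_choice a x with hmx | hmx <;> omega
    · exact fun y hy => h3 y (by simp [hy])

theorem foldl_min_eq (l : List Int) : ∀ (a m : Int), (m = a ∨ m ∈ l) → m ≤ a → (∀ y ∈ l, m ≤ y) →
    l.foldl min a = m := by
  induction l with
  | nil => intro a m h1 h2 _; simp; rcases h1 with h | h; omega; simp at h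
  | cons x t ih =>
    intro a m h1 h2 h3
    simp only [List.foldl_cons]
    have hx := h3 x (by simp)
    apply ih
    · rcases h1 with h | h
      · left; rcases min_choice a x with hmx | hmx <;> omega
      · rcases List.mem_cons.mp h with h | h
        · left; rcases min_choice a x with hmx | hmx <;> omega
        · right; exact h
    · rcases min_choice a x with hmx | hmx <;> omega
    · exact fun y hy => h3 y (by simp [hy])

theorem pairwise_le_getLast (s : List Int) (h : s ≠ []) (hp : s.Pairwise (· ≤ ·)) :
    ∀ y ∈ s, y ≤ s.getLast h := by
  induction s with
  | nil => simp at h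
  | cons x t ih =>
    intro y hy
    rcases List.pairwise_cons.mp hp with ⟨hx, ht⟩
    rcases List.mem_cons.mp hy with rfl | hyt
    · cases t with
      | nil => simp [List.getLast]
      | cons z u =>
        rw [List.getLast_cons (by simp)]
        exact le_trans (hx z (by simp)) (ih (by simp) ht z (by simp))
    · have ht' : t ≠ [] := by intro he; rw [he] at hyt; simp at hyt
      rw [List.getLast_cons ht']
      exact ih ht' ht y hyt

-- ===== VERDICT (by name: the statement is the Claim_ definition above) =====
theorem largestDifferenceOfEvens_spec : Claim_equal_largestDifferenceOfEvens := by
  intro arr _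
  unfold Spec_largestDifferenceOfEvens largestDifferenceOfEvens largestDifferenceOfEvens_alt
  have hfold : arr.foldl pvStepA (none, none, 0)
      = (arr.filter (fun x => x % 2 == 0)).foldl pvStepA' (none, none, 0) := by
    have := PySem.List.foldl_if_eq_foldl_filter (p := fun i : Int => i % 2 == 0)
      (f := pvStepA') (l := arr) (init := ((none, none, 0) : Option Int × Option Int × Int))
    simpa [← pvStepA_eq_if] using this.symm ▸ this
  simp only [hfold]
  set f := arr.filter (fun x => x % 2 == 0) with hf
  rcases h : f with _ | ⟨x, t⟩
  · simp [PySem.List.sorted]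
  · rcases t with _ | ⟨y, u⟩
    · have : PySem.List.sorted [x] (fun x : Int => x) false = [x] := rfl
      simp [List.foldl_cons, pvStepA', this]
    · -- f = x :: y :: u, at least two evens
      rw [List.foldl_cons, List.foldl_cons]
      have h1 : pvStepA' (pvStepA' (none, none, 0) x) y = (some (max x y), some (min x y), 2) := by
        simp only [pvStepA']
        split_ifs with h2 h3 <;> simp [max_def, min_def] <;> omega
      rw [h1, foldStep_some]
      set s := PySem.List.sorted (x :: y :: u) (fun x : Int => x) false with hs
      have hsne : s ≠ [] := by
        intro he
        have := PySem.List.length_sorted (x :: y :: u) (fun x : Int => x) false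
        rw [← hs, he] at this; simp at this
      have hperm : s.Perm (x :: y :: u) := PySem.List.sorted_perm (x :: y :: u) (fun x : Int => x) false
      have hmem : ∀ z, z ∈ s ↔ z ∈ x :: y :: u := fun z => hperm.mem_iff
      have hpw : s.Pairwise (· ≤ ·) := by
        have := PySem.List.sorted_pairwise (xs := x :: y :: u) (key := fun x : Int => x)
        simpa using this
      rcases hm : s with _ | ⟨m, st⟩
      · exact absurd hm hsne
      -- head m is ≤ everything; getLast M is ≥ everything
      have hmle : ∀ z ∈ x :: y :: u, m ≤ z := by
        intro z hz
        have := PySem.List.key_head_sorted_le (xs := x :: y :: u) (key := fun x : Int => x)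
          (m := m) (t := st) (by rw [← hs, hm]) z hz
        simpa using this
      have hmmem : m ∈ x :: y :: u := (hmem m).mp (by rw [hm]; simp)
      obtain ⟨M, hM⟩ : ∃ M, s.getLast hsne = M := ⟨_, rfl⟩
      have hMmem : M ∈ x :: y :: u := (hmem M).mp (hM ▸ List.getLast_mem hsne)
      have hMge : ∀ z ∈ x :: y :: u, z ≤ M := by
        intro z hz
        exact hM ▸ pairwise_le_getLast s hsne hpw z ((hmem z).mpr hz)
      -- A's fold results
      have hmax : u.foldl max (max x y) = M := by
        apply foldl_max_eq
        · rcases List.mem_cons.mp hMmem with rfl | hr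
          · left; have := hMge y (by simp); simp [max_def]; omega
          rcases List.mem_cons.mp hr with rfl | hr
          · left; have := hMge x (by simp); simp [max_def]; omega
          · right; exact hr
        · have hx := hMge x (by simp); have hy := hMge y (by simp)
          simp [max_def]; split_ifs <;> omega
        · exact fun z hz => hMge z (by simp [hz])
      have hmin : u.foldl min (min x y) = m := by
        apply foldl_min_eq
        · rcases List.mem_cons.mp hmmem with rfl | hr
          · left; have := hmle y (by simp); simp [min_def]; omega
          rcases List.mem_cons.mp hr with rfl | hr
          · left; have := hmle x (by simp); simp [min_def]; omega
          · right; exact hr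
        · have hx := hmle x (by simp); have hy := hmle y (by simp)
          simp [min_def]; split_ifs <;> omega
        · exact fun z hz => hmle z (by simp [hz])
      -- B's endpoints
      have hlast : PySem.List.pyGet? s (-1) = some M := by
        rw [PySem.List.pyGet?_neg_one, List.getLast?_eq_some_getLast hsne, hM]
      have hhead : PySem.List.pyGet? s 0 = some m := by
        rw [hm, PySem.List.pyGet?_zero_cons]
      have hslen : ¬ s.length < 2 := by
        have := PySem.List.length_sorted (x :: y :: u) (fun x : Int => x) false
        rw [← hs] at this; simp [List.length_cons] at this; omega
      simp only [hmax, hmin, ← hm]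
      rw [if_neg hslen, if_neg (by omega)]
      rw [hlast, hhead]
      simp
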